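-- pv_equiv track=rewrite | github.com/AlexanderCarlstrom/advent-of-code | aoc2023/day11/day11.py | add_columns
-- ===== SOURCE A (Python) =====
-- def add_columns(graph, part=1):
--     columns = [True] * len(graph[0])
--     t_graph = [''] * len(graph)
--     for r, row in enumerate(graph):
--         for c, ch in enumerate(row):
--             if ch == '#':
--                 columns[c] = False
--
--     for c, col in enumerate(columns):
--         for i in range(0, len(t_graph)):
--             if col:
--                 if part == 2:
--                     t_graph[i] += '.' * 1000000
--                 else:
--                     t_graph[i] += '.' * 2
--             else:
--                 t_graph[i] += graph[i][c]
--
--     return t_graph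
-- ===== SOURCE B (Python) =====
-- def add_columns(graph, part=1):
--     # Work in column space: transpose the grid, replace each '#'-free column by
--     # `width` all-dot columns, then transpose back.
--     width = 1000000 if part == 2 else 2
--     dot_col = ('.',) * len(graph)
--     expanded = []
--     for col in zip(*graph):
--         if '#' in col:
--             expanded.append(col)
--         else:
--             expanded.extend([dot_col] * width)
--     return [''.join(col[i] for col in expanded) for i in range(len(graph))]
-- ===== Notes on version B (the rewrite author's own statement) =====
-- stated objective: alternative
-- what changed: B works in column space: it transposes the grid with zip(*graph), replaces every '#'-free column tuple by width copies of an all-dot column, and transposes the expanded column list back, instead of A's boolean column-marking array consulted inside a column-major per-row string-concatenation loop.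
-- outside the precondition, e.g. on add_columns(['ab', 'a'], 1): A returns ['....', '....'], B returns ['..', '..']
import Mathlib
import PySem

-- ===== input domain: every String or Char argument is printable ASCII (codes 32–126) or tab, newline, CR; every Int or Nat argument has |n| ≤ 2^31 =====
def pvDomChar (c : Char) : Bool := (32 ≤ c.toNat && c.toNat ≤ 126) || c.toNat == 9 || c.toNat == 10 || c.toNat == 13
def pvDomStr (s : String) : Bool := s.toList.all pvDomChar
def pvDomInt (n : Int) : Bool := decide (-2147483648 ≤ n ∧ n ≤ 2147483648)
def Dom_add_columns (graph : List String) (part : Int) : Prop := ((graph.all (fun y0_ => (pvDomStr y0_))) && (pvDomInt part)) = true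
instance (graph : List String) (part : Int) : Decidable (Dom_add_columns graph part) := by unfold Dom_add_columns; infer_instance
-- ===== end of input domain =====

-- B works in column space (transpose, duplicate '#'-free columns, transpose back) instead of
-- A's boolean marking array + column-major string concatenation (objective: alternative).

-- ===== PORT A =====
-- work is done on List Char; '.' * k is pvFill k (kept behind a name so that simp never
-- materialises the 1000000-element list); strings are rebuilt with String.mk
def pvFill (n : Nat) : List Char := List.replicate n '.'

def add_columns (graph : List String) (part : Int) : List String :=
  let rows := graph.map String.toList
  let columns := rows.foldl
      (fun cols row =>
        (PySem.List.enumerate row).foldl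
          (fun cs p => if p.2 = '#' then PySem.List.pySetD cs p.1 false else cs) cols)
      (List.replicate (rows.headD []).length true)
  let t0 : List (List Char) := List.replicate graph.length []
  let t := (PySem.List.enumerate columns).foldl
      (fun ts p =>
        (PySem.List.enumerate ts).map
          (fun q =>
            if p.2 then
              if part == 2 then q.2 ++ pvFill 1000000
              else q.2 ++ pvFill 2
            else q.2 ++ [PySem.List.pyGetD (PySem.List.pyGetD rows q.1 []) p.1 ' '])) t0
  t.map String.mk

-- ===== PORT B =====
-- zip(*ls), ported by hand (exact): zip yields min-length many tuples, tuple c holding element c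
-- of every list (the getD default is never reached since c < every length)
def pyZipStar (ls : List (List Char)) : List (List Char) :=
  match (ls.map List.length).min? with
  | none => []
  | some m => (List.range m).map (fun c => ls.map (fun r => r.getD c ' '))

-- Source B: expand the column list (a '#'-free column becomes `width` all-dot columns), then
-- transpose back with a per-row join over range(len(graph)); col[i] is in range under Pre_,
-- so getD's default is never reached there
def add_columns_alt (graph : List String) (part : Int) : List String :=
  let rows := graph.map String.toList
  let width : Nat := if part == 2 then 1000000 else 2
  let dotcol : List Char := List.replicate graph.length '.'
  let expanded := (pyZipStar rows).foldl
      (fun acc col =>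
        if col.contains '#' then acc ++ [col] else acc ++ List.replicate width dotcol)
      ([] : List (List Char))
  (List.range graph.length).map (fun i =>
    String.mk (expanded.map (fun col => col.getD i ' ')))

-- ===== PRECONDITION & SPEC =====
-- Pre_ excludes the empty grid (A raises IndexError on graph[0]) and the ragged grids on which a
-- row is shorter than row 0 or carries '#' beyond row 0's width: there A either raises IndexError
-- (columns[c] / graph[i][c] out of range) or returns a value that is an accident of its
-- row-0-width indexing while B's zip truncates to the shortest row (see cites).
def Pre_add_columns (graph : List String) (part : Int) : Prop :=
  graph ≠ [] ∧ ∀ r ∈ graph,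
    (graph.headD "").toList.length ≤ r.toList.length ∧
    (r.toList.drop (graph.headD "").toList.length).contains '#' = false

instance (graph : List String) (part : Int) : Decidable (Pre_add_columns graph part) := by
  unfold Pre_add_columns; infer_instance

def pvWitness_add_columns : List String × Int := (["#.", ".."], 1)

def Spec_add_columns (graph : List String) (part : Int) (out : List String) : Prop :=
  out = add_columns_alt graph part
instance (graph : List String) (part : Int) (out : List String) : Decidable (Spec_add_columns graph part out) := by
  unfold Spec_add_columns; infer_instance

-- ===== CLAIM (what is proved, stated in full; the proofs are below) =====
def Claim_equal_add_columns : Prop := ∀ (graph : List String) (part : Int),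
  Dom_add_columns graph part → Pre_add_columns graph part →
  Spec_add_columns graph part (add_columns graph part)

-- ===== LEMMAS AND PROOFS =====

-- the marking step of A's first double loop
def pvMark (cs : List Bool) (p : Int × Char) : List Bool :=
  if p.2 = '#' then PySem.List.pySetD cs p.1 false else cs

lemma pvMark_foldl_length (row : List Char) : ∀ (k : Int) (cols : List Bool),
    ((PySem.List.enumerate row k).foldl pvMark cols).length = cols.length := by
  induction row with
  | nil => intro k cols; simp [PySem.List.enumerate_nil]
  | cons ch rt ih =>
      intro k cols
      rw [PySem.List.enumerate_cons, List.foldl_cons, ih]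
      by_cases h : ch = '#' <;> simp [pvMark, h, PySem.List.length_pySetD]

lemma pvMark_foldl_getD (row : List Char) : ∀ (k : Nat) (cols : List Bool) (j : Nat),
    ((PySem.List.enumerate row (k : Int)).foldl pvMark cols).getD j false
      = (cols.getD j false && (decide (j < k) || !(row.getD (j - k) ' ' == '#'))) := by
  induction row with
  | nil => intro k cols j; simp [PySem.List.enumerate_nil]
  | cons ch rt ih =>
      intro k cols j
      rw [PySem.List.enumerate_cons, List.foldl_cons]
      have hcast : ((k : Int) + 1) = ((k + 1 : Nat) : Int) := by push_cast; ring
      rw [hcast, ih (k + 1)]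
      by_cases hch : ch = '#'
      · subst hch
        have hstep : pvMark cols ((k : Int), '#') = cols.set k false := by
          simp [pvMark, PySem.List.pySetD_natCast]
        rw [hstep]
        rcases Nat.lt_trichotomy j k with hjk | hjk | hjk
        · have h1 : decide (j < k) = true := by simpa using hjk
          have h2 : decide (j < k + 1) = true := by simp; omega
          rw [h1, h2, List.getD_eq_getElem?_getD (l := cols.set k false),
              List.getElem?_set_ne (by omega), ← List.getD_eq_getElem?_getD]
          simp
        · subst hjk
          have h2 : decide (j < j + 1) = true := by simp
          have h1 : decide (j < j) = false := by simp
          rw [h1, h2, Nat.sub_self, List.getD_cons_zero,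
              List.getD_eq_getElem?_getD (l := cols.set j false), List.getD_eq_getElem?_getD (l := cols)]
          by_cases hj : j < cols.length
          · rw [List.getElem?_set_self (by omega)]
            simp
          · rw [List.getElem?_eq_none (l := cols.set j false) (by simp; omega),
                List.getElem?_eq_none (l := cols) (by omega)]
            simp
        · have h1 : decide (j < k) = false := by simp; omega
          have h2 : decide (j < k + 1) = false := by simp; omega
          have hsub : j - k = (j - (k + 1)) + 1 := by omega
          rw [h1, h2, hsub, List.getD_cons_succ,
              List.getD_eq_getElem?_getD (l := cols.set k false),
              List.getElem?_set_ne (by omega), ← List.getD_eq_getElem?_getD]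
      · have hstep : pvMark cols ((k : Int), ch) = cols := by
          simp [pvMark, hch]
        have hbe : (ch == '#') = false := by simpa using hch
        rw [hstep]
        rcases Nat.lt_trichotomy j k with hjk | hjk | hjk
        · have h1 : decide (j < k) = true := by simpa using hjk
          have h2 : decide (j < k + 1) = true := by simp; omega
          rw [h1, h2]; simp
        · subst hjk
          have h2 : decide (j < j + 1) = true := by simp
          have h1 : decide (j < j) = false := by simp
          rw [h1, h2, Nat.sub_self, List.getD_cons_zero, hbe]
          simp
        · have h1 : decide (j < k) = false := by simp; omega
          have h2 : decide (j < k + 1) = false := by simp; omega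
          have hsub : j - k = (j - (k + 1)) + 1 := by omega
          rw [h1, h2, hsub, List.getD_cons_succ]

-- A's whole first double loop, characterised pointwise
lemma pvCols_getD (rs : List (List Char)) : ∀ (cols : List Bool) (j : Nat),
    (rs.foldl (fun cols row => (PySem.List.enumerate row).foldl pvMark cols) cols).getD j false
      = (cols.getD j false && rs.all (fun r => !(r.getD j ' ' == '#'))) := by
  induction rs with
  | nil => intro cols j; simp
  | cons r rt ih =>
      intro cols j
      rw [List.foldl_cons, ih]
      have h := pvMark_foldl_getD r 0 cols j
      simp only [Nat.cast_zero, Nat.sub_zero, Nat.not_lt_zero, decide_false,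
        Bool.false_or] at h
      rw [h, List.all_cons, ← Bool.and_assoc]

lemma pvCols_length (rs : List (List Char)) : ∀ (cols : List Bool),
    (rs.foldl (fun cols row => (PySem.List.enumerate row).foldl pvMark cols) cols).length
      = cols.length := by
  induction rs with
  | nil => intro cols; rfl
  | cons r rt ih => intro cols; rw [List.foldl_cons, ih, pvMark_foldl_length]

-- A's second double loop appends, row by row, the flattened pieces
lemma pvAssembleA_length (rows : List (List Char)) (part : Int) (cols : List Bool) :
    ∀ (k : Int) (ts : List (List Char)),
    ((PySem.List.enumerate cols k).foldl
        (fun ts p => (PySem.List.enumerate ts).map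
          (fun q => if p.2 then
              (if part == 2 then q.2 ++ pvFill 1000000 else q.2 ++ pvFill 2)
            else q.2 ++ [PySem.List.pyGetD (PySem.List.pyGetD rows q.1 []) p.1 ' '])) ts).length
      = ts.length := by
  induction cols with
  | nil => intro k ts; simp [PySem.List.enumerate_nil]
  | cons c ct ih =>
      intro k ts
      rw [PySem.List.enumerate_cons, List.foldl_cons, ih]
      simp [PySem.List.length_enumerate]

lemma pvAssembleA_getD (rows : List (List Char)) (part : Int) (cols : List Bool) :
    ∀ (k : Int) (ts : List (List Char)) (i : Nat), i < ts.length →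
    ((PySem.List.enumerate cols k).foldl
        (fun ts p => (PySem.List.enumerate ts).map
          (fun q => if p.2 then
              (if part == 2 then q.2 ++ pvFill 1000000 else q.2 ++ pvFill 2)
            else q.2 ++ [PySem.List.pyGetD (PySem.List.pyGetD rows q.1 []) p.1 ' '])) ts).getD i []
      = ts.getD i [] ++ ((PySem.List.enumerate cols k).map
          (fun p => if p.2 then pvFill (if part == 2 then 1000000 else 2)
            else [PySem.List.pyGetD (PySem.List.pyGetD rows (i : Int) []) p.1 ' '])).flatten := by
  induction cols with
  | nil => intro k ts i hi; simp [PySem.List.enumerate_nil]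
  | cons c ct ih =>
      intro k ts i hi
      rw [PySem.List.enumerate_cons, List.foldl_cons, List.map_cons, List.flatten_cons]
      rw [ih _ _ i (by simpa [PySem.List.length_enumerate] using hi)]
      have hgd : ((PySem.List.enumerate ts 0).map
          (fun q => if c then
              (if part == 2 then q.2 ++ pvFill 1000000 else q.2 ++ pvFill 2)
            else q.2 ++ [PySem.List.pyGetD (PySem.List.pyGetD rows q.1 []) k ' '])).getD i []
          = ts.getD i [] ++ (if c then pvFill (if part == 2 then 1000000 else 2)
              else [PySem.List.pyGetD (PySem.List.pyGetD rows (i : Int) []) k ' ']) := by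
        rw [List.getD_eq_getElem?_getD, List.getElem?_map, PySem.List.getElem?_enumerate]
        rw [List.getElem?_eq_getElem hi]
        simp only [Option.map_some, Option.getD_some, Int.zero_add]
        rw [List.getD_eq_getElem?_getD, List.getElem?_eq_getElem hi]
        rcases c with _ | _
        · simp
        · by_cases hp : (part == 2) <;> simp [hp]
      rw [hgd, List.append_assoc]

-- the minimum of the lengths when the head is (weakly) shortest
lemma pvMinLen (rs : List (List Char)) (L : Nat) (hne : rs ≠ [])
    (hhd : (rs.headD []).length = L) (h : ∀ r ∈ rs, L ≤ r.length) :
    (rs.map List.length).min? = some L := by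
  rw [List.min?_eq_some_iff]
  constructor
  · have hm : rs.headD [] ∈ rs := by
      cases rs with
      | nil => exact absurd rfl hne
      | cons a l => exact List.mem_cons_self
    exact hhd ▸ List.mem_map_of_mem hm
  · intro b hb
    obtain ⟨r, hr, rfl⟩ := List.mem_map.1 hb
    exact h r hr

-- '#' not in (map f rs)  =  every f r is not '#'
lemma pvNotContains (rs : List (List Char)) (f : List Char → Char) :
    (!((rs.map f).contains '#')) = rs.all (fun r => !(f r == '#')) := by
  induction rs with
  | nil => rfl
  | cons x xs ih => simp_all [List.contains_cons, beq_eq_decide, eq_comm]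

lemma pvReplicate_getD (L j : Nat) :
    (List.replicate L true).getD j false = decide (j < L) := by
  rw [List.getD_eq_getElem?_getD, List.getElem?_replicate]
  by_cases h : j < L <;> simp [h]

-- ===== VERDICT (by name: the statements are the Claim_ definitions above) =====
theorem add_columns_spec : Claim_equal_add_columns := by
  intro graph part _ hpre
  obtain ⟨hne, hlen⟩ := hpre
  unfold Spec_add_columns add_columns add_columns_alt
  dsimp only
  have hMark : (fun cs (p : Int × Char) =>
      if p.2 = '#' then PySem.List.pySetD cs p.1 false else cs) = pvMark := rfl
  rw [hMark]
  set rows := graph.map String.toList with hrows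
  set L := (rows.headD []).length with hL
  set width : Nat := if part == 2 then 1000000 else 2 with hwidth
  have hnR : rows ≠ [] := by
    cases graph with
    | nil => exact absurd rfl hne
    | cons a l => simp [hrows]
  have hhead : rows.headD [] = (graph.headD "").toList := by
    cases graph with
    | nil => exact absurd rfl hne
    | cons a l => rfl
  have hheadL : (rows.headD []).length = L := rfl
  have hlenR : ∀ r ∈ rows, L ≤ r.length := by
    intro r hr
    obtain ⟨g, hg, rfl⟩ := List.mem_map.1 hr
    rw [hL, hhead]
    exact (hlen g hg).1
  set colsE := rows.foldl
      (fun cols row => (PySem.List.enumerate row).foldl pvMark cols)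
      (List.replicate L true) with hcols
  have hclen : colsE.length = L := by
    rw [hcols, pvCols_length, List.length_replicate]
  have hcolgetD : ∀ c, c < L → colsE.getD c false
      = rows.all (fun r => !(r.getD c ' ' == '#')) := by
    intro c hc
    rw [hcols, pvCols_getD, pvReplicate_getD, decide_eq_true hc, Bool.true_and]
  have hzip : pyZipStar rows
      = (List.range L).map (fun c => rows.map (fun r => r.getD c ' ')) := by
    unfold pyZipStar
    rw [pvMinLen rows L hnR hheadL hlenR]
  -- B's column expansion as a flatMap
  have hexp : (pyZipStar rows).foldl
      (fun acc col =>
        if col.contains '#' then acc ++ [col] else acc ++ List.replicate width (List.replicate graph.length '.'))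
      ([] : List (List Char))
      = (pyZipStar rows).flatMap
          (fun col => if col.contains '#' then [col]
            else List.replicate width (List.replicate graph.length '.')) := by
    have hstep : (fun (acc : List (List Char)) col =>
        if col.contains '#' then acc ++ [col] else acc ++ List.replicate width (List.replicate graph.length '.'))
        = (fun acc col => acc ++ (if col.contains '#' then [col]
            else List.replicate width (List.replicate graph.length '.'))) := by
      funext acc col; split_ifs <;> rfl
    rw [hstep, PySem.List.foldl_append_eq_flatMap]
    rfl
  rw [hexp]
  apply List.ext_getElem
  · rw [List.length_map, pvAssembleA_length, List.length_replicate, List.length_map,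
        List.length_range]
  · intro i h1 h2
    rw [List.length_map, pvAssembleA_length, List.length_replicate] at h1
    rw [List.length_map, List.length_range] at h2
    rw [List.getElem_map, List.getElem_map, List.getElem_range]
    have hiR : i < rows.length := by rw [hrows, List.length_map]; exact h1
    have hilt : i < (List.replicate graph.length ([] : List Char)).length := by
      rw [List.length_replicate]; exact h1
    have hfoldlen : i < ((PySem.List.enumerate colsE).foldl
        (fun ts p => (PySem.List.enumerate ts).map
          (fun q => if p.2 then
              (if part == 2 then q.2 ++ pvFill 1000000 else q.2 ++ pvFill 2)
            else q.2 ++ [PySem.List.pyGetD (PySem.List.pyGetD rows q.1 []) p.1 ' ']))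
        (List.replicate graph.length [])).length := by
      rw [pvAssembleA_length, List.length_replicate]; exact h1
    rw [← List.getD_eq_getElem _ [] hfoldlen, pvAssembleA_getD rows part colsE 0 _ i hilt,
        List.getD_replicate, List.nil_append]
    congr 1
    -- right side: map-over-flatMap becomes flatten of per-column pieces
    rw [hzip, List.map_flatMap, List.flatMap_def, List.map_map]
    -- left side: enumerate → pyRange → List.range
    rw [PySem.List.enumerate_eq_map_pyRange (d := false) (xs := colsE), List.map_map]
    simp only [PySem.List.len]
    rw [hclen, PySem.List.pyRange_one]
    simp only [Int.sub_zero, Int.toNat_natCast, List.map_map]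
    congr 1
    apply List.map_congr_left
    intro c hc
    have hcL : c < L := List.mem_range.1 hc
    simp only [Function.comp, Int.zero_add, PySem.List.pyGetD_natCast]
    have hmapgetD : ∀ (f : List Char → Char),
        (rows.map f).getD i ' ' = f rows[i] := by
      intro f
      rw [List.getD_eq_getElem?_getD, List.getElem?_map, List.getElem?_eq_getElem hiR]
      rfl
    have hcond : (rows.map (fun r => r.getD c ' ')).contains '#'
        = !(colsE.getD c false) := by
      rw [hcolgetD c hcL, ← pvNotContains rows (fun r => r.getD c ' '), Bool.not_not]
    rw [hcond]
    rw [List.getD_eq_getElem rows [] hiR]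
    cases hE : colsE.getD c false with
    | true =>
        have hdot : (List.replicate graph.length '.').getD i ' ' = '.' := by
          rw [List.getD_eq_getElem?_getD, List.getElem?_replicate]
          simp [h1]
        simp only [Bool.not_true, Bool.false_eq_true, if_false, List.map_replicate, hdot]
        rw [hwidth]
        exact rfl
    | false =>
        simp only [Bool.not_false, if_true, Bool.false_eq_true, if_false,
          List.map_cons, List.map_nil, hmapgetD]
    exact h1
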